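-- pv_equiv track=rewrite | github.com/volundmush/mudslide | mudslide/utils/misc.py | string_partial_matching
-- ===== SOURCE A (Python) =====
-- from collections import defaultdict
--
-- def string_partial_matching(alternatives, inp, ret_index=True):
--     """
--     Partially matches a string based on a list of `alternatives`.
--     Matching is made from the start of each subword in each
--     alternative. Case is not important. So e.g. "bi sh sw" or just
--     "big" or "shiny" or "sw" will match "Big shiny sword". Scoring is
--     done to allow to separate by most common demoninator. You will get
--     multiple matches returned if appropriate.
--
--     Args:
--         alternatives (list of str): A list of possible strings to
--             match.
--         inp (str): Search criterion.
--         ret_index (bool, optional): Return list of indices (from alternatives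
--             array) instead of strings.
--     Returns:
--         matches (list): String-matches or indices if `ret_index` is `True`.
--
--     """
--     if not alternatives or not inp:
--         return []
--
--     matches = defaultdict(list)
--     inp_words = inp.lower().split()
--     for altindex, alt in enumerate(alternatives):
--         alt_words = alt.lower().split()
--         last_index = 0
--         score = 0
--         for inp_word in inp_words:
--             # loop over parts, making sure only to visit each part once
--             # (this will invalidate input in the wrong word order)
--             submatch = [
--                 last_index + alt_num
--                 for alt_num, alt_word in enumerate(alt_words[last_index:])
--                 if alt_word.startswith(inp_word)
--             ]
--             if submatch:
--                 last_index = min(submatch) + 1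
--                 score += 1
--             else:
--                 score = 0
--                 break
--         if score:
--             if ret_index:
--                 matches[score].append(altindex)
--             else:
--                 matches[score].append(alt)
--     if matches:
--         return matches[max(matches)]
--     return []
-- ===== SOURCE B (Python) =====
-- def string_partial_matching(alternatives, inp, ret_index=True):
--     """Same contract as A, restructured: instead of A's per-input-word scans
--     (submatch list, min, last_index) and score dict keyed selection, B makes
--     ONE linear pass over each alternative's words, consuming a 'pending' list
--     of input words; the alternative matches iff nothing is left pending.
--     Greedy earliest consumption succeeds iff any in-order matching exists,
--     and every match scores len(inp_words), so A's dict is redundant."""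
--     if not alternatives or not inp:
--         return []
--     inp_words = inp.lower().split()
--     if not inp_words:
--         return []
--
--     def covers(alt):
--         pending = inp_words
--         for word in alt.lower().split():
--             if pending and word.startswith(pending[0]):
--                 pending = pending[1:]
--         return not pending
--
--     return [i if ret_index else a
--             for i, a in enumerate(alternatives) if covers(a)]
-- ===== Notes on version B (the rewrite author's own statement) =====
-- stated objective: alternative
-- what changed: B inverts the loop nesting: one linear pass over each alternative's words consuming a pending list of input words (correct because greedy earliest consumption succeeds iff any in-order matching exists), replacing A's per-input-word suffix scans with submatch lists, min and last_index, and dropping A's score defaultdict and matches[max(matches)] selection since every match scores len(inp_words).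
-- outside the precondition, e.g. on string_partial_matching(['big sword'], 'big', False): A returns ['big sword'], B returns ['big sword']
import Mathlib
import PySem

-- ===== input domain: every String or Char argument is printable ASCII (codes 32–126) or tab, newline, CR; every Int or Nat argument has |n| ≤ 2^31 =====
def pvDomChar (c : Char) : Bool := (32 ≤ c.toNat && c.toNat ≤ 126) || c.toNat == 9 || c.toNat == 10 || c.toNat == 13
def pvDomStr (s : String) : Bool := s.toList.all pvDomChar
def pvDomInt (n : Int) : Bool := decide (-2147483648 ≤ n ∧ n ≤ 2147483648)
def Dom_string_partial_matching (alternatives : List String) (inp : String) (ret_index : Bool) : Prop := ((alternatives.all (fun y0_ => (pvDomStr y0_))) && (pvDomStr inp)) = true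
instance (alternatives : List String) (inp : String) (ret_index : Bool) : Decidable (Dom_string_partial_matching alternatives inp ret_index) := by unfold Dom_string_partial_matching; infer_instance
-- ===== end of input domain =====

-- B inverts the loop nesting: one pass over each alternative's words consuming a pending
-- list of input words, replacing A's per-input-word suffix scans and its score dict.


-- ===== PORT A =====
-- inner 'for inp_word in inp_words' loop of A: builds submatch, advances last_index, scores;
-- 'score = 0; break' is the 0 result
def spmLoop (inpWords altWords : List String) (lastIndex score : Int) : Int :=
  match inpWords with
  | [] => score
  | w :: ws =>
    let submatch :=
      (PySem.List.enumerate (PySem.List.slice altWords (some lastIndex) none)).filterMap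
        (fun p => if PySem.Str.startswith p.2 w then some (lastIndex + p.1) else none)
    match PySem.List.min? submatch (fun x => x) with
    | some m => spmLoop ws altWords (m + 1) (score + 1)
    | none => 0

def string_partial_matching (alternatives : List String) (inp : String) (ret_index : Bool) : List Int :=
  if alternatives = [] ∨ inp = "" then []
  else
    let inpWords := PySem.Str.split₀ (PySem.Str.lower inp)
    let matchesD : PySem.Dict Int (List Int) :=
      (PySem.List.enumerate alternatives).foldl
        (fun d p =>
          let altWords := PySem.Str.split₀ (PySem.Str.lower p.2)
          let score := spmLoop inpWords altWords 0 0
          if score ≠ 0 then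
            (if ret_index then PySem.Dict.modify d score [] (fun l => l ++ [p.1]) else d)
            -- with ret_index = False Python appends the alternative STRING (not an Int);
            -- that branch lies outside Pre_ and is ported as a no-op
          else d)
        PySem.Dict.empty
    match PySem.List.max? matchesD.keys (fun x => x) with
    | some m => matchesD.getD m []
    | none => []

-- ===== PORT B =====
-- one step of B's pass over an alternative's words: consume the head pending input word
-- if this word starts with it
def spmStep (pending : List String) (word : String) : List String :=
  match pending with
  | [] => []
  | w :: ws => if PySem.Str.startswith word w then ws else w :: ws

def string_partial_matching_alt (alternatives : List String) (inp : String) (ret_index : Bool) : List Int :=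
  if alternatives = [] ∨ inp = "" then []
  else
    let inpWords := PySem.Str.split₀ (PySem.Str.lower inp)
    if inpWords = [] then []
    else
      (PySem.List.enumerate alternatives).foldl
        (fun acc p =>
          if (PySem.Str.split₀ (PySem.Str.lower p.2)).foldl spmStep inpWords = [] then
            acc ++ [p.1]
          else acc)
        []

-- ===== PRECONDITION & SPEC =====
-- Pre_ excludes ret_index = false only because A then returns a list of STRINGS, which is
-- not a value of the declared List Int return type (B matches A there in Python).
def Pre_string_partial_matching (alternatives : List String) (inp : String) (ret_index : Bool) : Prop :=
  ret_index = true
instance (alternatives : List String) (inp : String) (ret_index : Bool) : Decidable (Pre_string_partial_matching alternatives inp ret_index) := by unfold Pre_string_partial_matching; infer_instance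

def pvWitness_string_partial_matching : List String × String × Bool :=
  (["Big shiny sword", "axe"], "bi sw", true)

def Spec_string_partial_matching (alternatives : List String) (inp : String) (ret_index : Bool) (out : List Int) : Prop := out = string_partial_matching_alt alternatives inp ret_index
instance (alternatives : List String) (inp : String) (ret_index : Bool) (out : List Int) : Decidable (Spec_string_partial_matching alternatives inp ret_index out) := by unfold Spec_string_partial_matching; infer_instance

-- ===== CLAIM (what is proved, stated in full; the proofs are below) =====
def Claim_equal_string_partial_matching : Prop := ∀ (alternatives : List String) (inp : String) (ret_index : Bool), Dom_string_partial_matching alternatives inp ret_index → Pre_string_partial_matching alternatives inp ret_index → Spec_string_partial_matching alternatives inp ret_index (string_partial_matching alternatives inp ret_index)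

-- ===== LEMMAS AND PROOFS =====

-- offset of the first word of l that startswith w (proof-only characterisation)
def spmFirst (l : List String) (w : String) : Option Nat :=
  match l with
  | [] => none
  | a :: rest => if PySem.Str.startswith a w then some 0 else (spmFirst rest w).map (· + 1)

lemma spmFirst_cons (a : String) (rest : List String) (w : String) :
    spmFirst (a :: rest) w
    = if PySem.Str.startswith a w then some 0 else (spmFirst rest w).map (· + 1) := rfl

-- proof-only greedy consumer relating the two traversal orders
def spmConsume (altWords : List String) (w : String) : Option (List String) :=
  match altWords with
  | [] => none
  | a :: rest => if PySem.Str.startswith a w then some rest else spmConsume rest w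

def spmOk (inpWords altWords : List String) : Bool :=
  match inpWords with
  | [] => true
  | w :: ws =>
    match spmConsume altWords w with
    | none => false
    | some rest => spmOk ws rest

lemma spm_mem_enumerate_fst_le {α : Type} (l : List α) (st : Int) (p : Int × α)
    (h : p ∈ PySem.List.enumerate l st) : st ≤ p.1 := by
  induction l generalizing st with
  | nil => simp [PySem.List.enumerate] at h
  | cons a rest ih =>
    simp only [PySem.List.enumerate, List.mem_cons] at h
    rcases h with h | h
    · simp [h]
    · have := ih (st + 1) h; omega

lemma spm_minsub (w : String) (c : Int) (l : List String) : ∀ (st : Int),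
    PySem.List.min?
      ((PySem.List.enumerate l st).filterMap
        (fun p => if PySem.Str.startswith p.2 w then some (c + p.1) else none))
      (fun x => x)
    = Option.map (fun n : Nat => c + st + (n : Int)) (spmFirst l w) := by
  induction l with
  | nil => intro st; simp [PySem.List.enumerate, PySem.List.min?, spmFirst]
  | cons a rest ih =>
    intro st
    have henum : PySem.List.enumerate (a :: rest) st
        = (st, a) :: PySem.List.enumerate rest (st + 1) := by
      simp [PySem.List.enumerate]
    rw [henum, List.filterMap_cons]
    dsimp only
    by_cases hsw : PySem.Str.startswith a w = true
    · rw [if_pos hsw, PySem.List.min?_id_cons]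
      have hall : ∀ y ∈ (PySem.List.enumerate rest (st + 1)).filterMap
          (fun p => if PySem.Str.startswith p.2 w then some (c + p.1) else none), c + st ≤ y := by
        intro y hy
        rcases List.mem_filterMap.mp hy with ⟨p, hp, hpy⟩
        have h1 := spm_mem_enumerate_fst_le rest (st + 1) p hp
        by_cases h2 : PySem.Str.startswith p.2 w = true
        · rw [if_pos h2] at hpy
          injection hpy with hpy
          omega
        · rw [if_neg h2] at hpy
          exact absurd hpy (by simp)
      have hle := PySem.List.foldl_min_le
        ((PySem.List.enumerate rest (st + 1)).filterMap
          (fun p => if PySem.Str.startswith p.2 w then some (c + p.1) else none)) (c + st)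
      have hmem := PySem.List.foldl_min_mem
        ((PySem.List.enumerate rest (st + 1)).filterMap
          (fun p => if PySem.Str.startswith p.2 w then some (c + p.1) else none)) (c + st)
      have key : List.foldl min (c + st)
          ((PySem.List.enumerate rest (st + 1)).filterMap
            (fun p => if PySem.Str.startswith p.2 w then some (c + p.1) else none)) = c + st := by
        rcases hmem with hmem | hmem
        · exact hmem
        · have := hall _ hmem; omega
      rw [key]
      rw [show spmFirst (a :: rest) w = some 0 by rw [spmFirst_cons, if_pos hsw]]
      simp
    · rw [if_neg hsw, ih (st + 1)]
      rw [show spmFirst (a :: rest) w = (spmFirst rest w).map (· + 1) by rw [spmFirst_cons, if_neg hsw]]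
      cases spmFirst rest w with
      | none => simp
      | some n => simp; ring

lemma spm_consume_eq (w : String) : ∀ (l : List String),
    spmConsume l w = Option.map (fun n : Nat => l.drop (n + 1)) (spmFirst l w) := by
  intro l
  induction l with
  | nil => rfl
  | cons a rest ih =>
    rw [show spmConsume (a :: rest) w
        = (if PySem.Str.startswith a w then some rest else spmConsume rest w) from rfl]
    by_cases hsw : PySem.Str.startswith a w = true
    · rw [if_pos hsw, show spmFirst (a :: rest) w = some 0 by rw [spmFirst_cons, if_pos hsw]]
      simp
    · rw [if_neg hsw, ih,
        show spmFirst (a :: rest) w = (spmFirst rest w).map (· + 1) by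
          rw [spmFirst_cons, if_neg hsw]]
      cases spmFirst rest w <;> simp

lemma spm_loop_eq (ws : List String) : ∀ (altWords : List String) (li : Nat) (s : Int),
    spmLoop ws altWords (li : Int) s
    = if spmOk ws (altWords.drop li) then s + (ws.length : Int) else 0 := by
  induction ws with
  | nil => intro altWords li s; simp [spmLoop, spmOk]
  | cons w ws ih =>
    intro altWords li s
    rw [spmLoop]
    have hslice : PySem.List.slice altWords (some (li : Int)) none = altWords.drop li :=
      PySem.List.slice_from_natCast altWords li
    rw [hslice, spm_minsub w (li : Int) (altWords.drop li) 0]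
    rw [show spmOk (w :: ws) (altWords.drop li)
        = (match spmConsume (altWords.drop li) w with
           | none => false
           | some rest => spmOk ws rest) from rfl]
    rw [spm_consume_eq w (altWords.drop li)]
    cases hf : spmFirst (altWords.drop li) w with
    | none => simp
    | some n =>
      simp only [Option.map_some]
      have hidx : (li : Int) + 0 + (n : Int) + 1 = ((li + n + 1 : Nat) : Int) := by
        push_cast; ring
      rw [hidx, ih altWords (li + n + 1) (s + 1)]
      have hdrop : (altWords.drop li).drop (n + 1) = altWords.drop (li + n + 1) := by
        rw [List.drop_drop]; ring_nf
      simp only [hdrop]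
      by_cases hok : spmOk ws (altWords.drop (li + n + 1)) = true
      · simp only [hok, if_true, List.length_cons]; push_cast; ring
      · simp only [Bool.not_eq_true] at hok
        simp [hok]

-- B's single pass leaves nothing pending iff A's greedy-over-input-words check succeeds
lemma spm_scan_ok : ∀ (l pending : List String),
    (l.foldl spmStep pending = []) ↔ (spmOk pending l = true) := by
  intro l
  induction l with
  | nil =>
    intro pending
    cases pending with
    | nil => simp [spmOk]
    | cons w ws => simp [spmOk, spmConsume]
  | cons a rest ih =>
    intro pending
    cases pending with
    | nil =>
      simp only [List.foldl_cons, show spmStep [] a = [] from rfl]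
      rw [ih []]
      simp [spmOk]
    | cons w ws =>
      simp only [List.foldl_cons]
      rw [show spmStep (w :: ws) a = (if PySem.Str.startswith a w then ws else w :: ws) from rfl]
      by_cases hsw : PySem.Str.startswith a w = true
      · rw [if_pos hsw, ih ws]
        rw [show spmOk (w :: ws) (a :: rest)
            = (match spmConsume (a :: rest) w with
               | none => false
               | some r => spmOk ws r) from rfl]
        rw [show spmConsume (a :: rest) w
            = (if PySem.Str.startswith a w then some rest else spmConsume rest w) from rfl]
        rw [if_pos hsw]
      · rw [if_neg hsw, ih (w :: ws)]
        rw [show spmOk (w :: ws) (a :: rest)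
            = (match spmConsume (a :: rest) w with
               | none => false
               | some r => spmOk ws r) from rfl]
        rw [show spmConsume (a :: rest) w
            = (if PySem.Str.startswith a w then some rest else spmConsume rest w) from rfl]
        rw [if_neg hsw]
        rfl

-- the single-key dict A's loop maintains when ret_index is true
def spmMkD (k : Int) (acc : List Int) : PySem.Dict Int (List Int) :=
  PySem.Dict.mk (if acc = [] then [] else [(k, acc)])

lemma spm_modify_mkD (k i : Int) (acc : List Int) :
    PySem.Dict.modify (spmMkD k acc) k [] (fun l => l ++ [i]) = spmMkD k (acc ++ [i]) := by
  by_cases h : acc = []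
  · subst h
    simp [spmMkD, PySem.Dict.modify, PySem.Dict.insert, PySem.Dict.getD, PySem.Dict.get?,
      PySem.Dict.contains]
  · simp [spmMkD, h, PySem.Dict.modify, PySem.Dict.insert, PySem.Dict.getD, PySem.Dict.get?,
      PySem.Dict.contains]

lemma spm_fold_inv (inpWords : List String) (h : inpWords ≠ []) :
    ∀ (l : List (Int × String)) (acc : List Int),
    l.foldl
      (fun d p =>
        if spmLoop inpWords (PySem.Str.split₀ (PySem.Str.lower p.2)) 0 0 ≠ 0 then
          PySem.Dict.modify d (spmLoop inpWords (PySem.Str.split₀ (PySem.Str.lower p.2)) 0 0)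
            [] (fun l => l ++ [p.1])
        else d)
      (spmMkD (inpWords.length : Int) acc)
    = spmMkD (inpWords.length : Int)
        (l.foldl
          (fun acc p =>
            if (PySem.Str.split₀ (PySem.Str.lower p.2)).foldl spmStep inpWords = [] then
              acc ++ [p.1]
            else acc)
          acc) := by
  intro l
  induction l with
  | nil => intro acc; rfl
  | cons p rest ih =>
    intro acc
    simp only [List.foldl_cons]
    have hscore : spmLoop inpWords (PySem.Str.split₀ (PySem.Str.lower p.2)) 0 0
        = if spmOk inpWords (PySem.Str.split₀ (PySem.Str.lower p.2))
          then (inpWords.length : Int) else 0 := by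
      have h0 := spm_loop_eq inpWords (PySem.Str.split₀ (PySem.Str.lower p.2)) 0 0
      simpa using h0
    by_cases hok : spmOk inpWords (PySem.Str.split₀ (PySem.Str.lower p.2)) = true
    · have hscan : (PySem.Str.split₀ (PySem.Str.lower p.2)).foldl spmStep inpWords = [] :=
        (spm_scan_ok _ _).mpr hok
      have hk : (inpWords.length : Int) ≠ 0 := by
        have : inpWords.length ≠ 0 := by simpa [List.length_eq_zero_iff] using h
        omega
      rw [show (if spmLoop inpWords (PySem.Str.split₀ (PySem.Str.lower p.2)) 0 0 ≠ 0 then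
          PySem.Dict.modify (spmMkD (inpWords.length : Int) acc)
            (spmLoop inpWords (PySem.Str.split₀ (PySem.Str.lower p.2)) 0 0) [] (fun l => l ++ [p.1])
        else spmMkD (inpWords.length : Int) acc)
        = spmMkD (inpWords.length : Int) (acc ++ [p.1]) by
          rw [hscore]; simp only [hok, if_true, hk, ne_eq, not_false_iff]
          exact spm_modify_mkD _ _ _]
      rw [ih (acc ++ [p.1])]
      rw [show (if (PySem.Str.split₀ (PySem.Str.lower p.2)).foldl spmStep inpWords = []
          then acc ++ [p.1] else acc) = acc ++ [p.1] by simp [hscan]]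
    · simp only [Bool.not_eq_true] at hok
      have hscan : ¬ ((PySem.Str.split₀ (PySem.Str.lower p.2)).foldl spmStep inpWords = []) := by
        intro hc
        have := (spm_scan_ok _ _).mp hc
        simp [hok] at this
      rw [show (if spmLoop inpWords (PySem.Str.split₀ (PySem.Str.lower p.2)) 0 0 ≠ 0 then
          PySem.Dict.modify (spmMkD (inpWords.length : Int) acc)
            (spmLoop inpWords (PySem.Str.split₀ (PySem.Str.lower p.2)) 0 0) [] (fun l => l ++ [p.1])
        else spmMkD (inpWords.length : Int) acc)
        = spmMkD (inpWords.length : Int) acc by rw [hscore]; simp [hok]]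
      rw [ih acc]
      rw [show (if (PySem.Str.split₀ (PySem.Str.lower p.2)).foldl spmStep inpWords = []
          then acc ++ [p.1] else acc) = acc by simp [hscan]]

lemma spm_fold_empty_inp (l : List (Int × String)) (d : PySem.Dict Int (List Int)) :
    l.foldl
      (fun d p =>
        if spmLoop ([] : List String) (PySem.Str.split₀ (PySem.Str.lower p.2)) 0 0 ≠ 0 then
          PySem.Dict.modify d (spmLoop ([] : List String) (PySem.Str.split₀ (PySem.Str.lower p.2)) 0 0)
            [] (fun l => l ++ [p.1])
        else d)
      d = d := by
  induction l generalizing d with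
  | nil => rfl
  | cons p rest ih => simpa [spmLoop] using ih d

-- ===== VERDICT (by name: the statement is the Claim_ definition above) =====
theorem string_partial_matching_spec : Claim_equal_string_partial_matching := by
  intro alternatives inp ret_index _ hpre
  unfold Pre_string_partial_matching at hpre
  subst hpre
  unfold Spec_string_partial_matching string_partial_matching string_partial_matching_alt
  by_cases h1 : alternatives = [] ∨ inp = ""
  · simp [h1]
  · simp only [h1, if_false, if_true]
    by_cases h2 : PySem.Str.split₀ (PySem.Str.lower inp) = []
    · rw [h2]
      simp only [ite_true]
      rw [spm_fold_empty_inp]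
      simp [PySem.Dict.empty, PySem.Dict.keys, PySem.List.max?]
    · simp only [h2, if_false]
      rw [show (PySem.Dict.empty : PySem.Dict Int (List Int))
          = spmMkD ((PySem.Str.split₀ (PySem.Str.lower inp)).length : Int) [] from rfl]
      rw [spm_fold_inv _ h2]
      cases h3 : (PySem.List.enumerate alternatives).foldl
          (fun acc p =>
            if (PySem.Str.split₀ (PySem.Str.lower p.2)).foldl spmStep
                (PySem.Str.split₀ (PySem.Str.lower inp)) = [] then acc ++ [p.1] else acc)
          ([] : List Int) with
      | nil => simp [spmMkD, PySem.Dict.keys, PySem.List.max?]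
      | cons x xs =>
        simp [spmMkD, PySem.Dict.keys, PySem.List.max?, PySem.Dict.getD, PySem.Dict.get?]
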